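/- GENERATED by mk_final_copies.py from the proof of the farm's unit `start_decoder.R7c` (farm:start_decoder.R7c.1: Lemmas.lean) as the
   re-elaboration sweep compiled it — do not edit. -/
/-
  LEMMAS of unit `start_decoder.R7c` (0x115e8d – 0x115eee: one round of loop 4084, or its exit to the head of loop 4079). The
  machine walks are in Proof.lean.

      rsp_eq                   the steady stack pointer in the walker's form
      arena_where, check_blk   a block of the ghost arena: where it is (one arithmetic fact for the walker), a check site inside it
      Geo, geo                 the three blocks the round touches (record `i` inside `residue_config`, the `classdata` table, row `j`)
                               with the bounds of the round's numbers (`j`, `n`, `temp`, `classifications`) and "row `j` is apart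
                               from `residue_config`" (by their ages), as ONE record of facts
      load_cls … byte_addr     the loads and the store address of the round in the walker's spelling (`UInt64.ofNat`, not `addr`:
                               with that spelling and `arena_where` in the context the walker resolves every load by itself)
      zext8, byte_of_digit     `movzx` of a byte value; the byte `dl` stored is the digit
      kword_pos, k_msb, kword_pred   r12d as the counter `k = n − 1` (`test ; js`, `sub r12d, 1`)
      idiv_small, idiv_nat     `cdq ; idiv r32` of `0 ≤ temp < 2^31` by `1 ≤ d < 2^31`: no `#DE`, quotient and remainder (by hand:
                               `bv_decide` times out on the model's 64-bit `sdiv`)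
-/
import Asan.CheckWalk
import Vorbis.Spec.StartDecoderBTest
import Vorbis.Spec.Units.start_decoder_R7c

open X86 X86.User Asan Vorbis Vorbis.Spec Vorbis.Spec.StartDecoder

set_option maxRecDepth 4000
set_option maxHeartbeats 4000000

namespace Vorbis.Spec.start_decoder_R7c

/-! ### The frame -/

/-- The steady stack pointer in the walker's form, and as a number. -/
theorem rsp_eq {u₀ : State} {g : Ghost} {pc : Word} {A : Arena × List Obj} {v : State} (h : Frame u₀ g pc A v) :
    v.reg .rsp = g.e.reg .rsp - 1480 ∧ g.R + 1480 = (g.e.reg .rsp).toNat := by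
  have h1 := h.r_eq.1
  have h2 := h.ra
  simp only [steady, depth, Ghost.RA] at h1 h2
  refine ⟨?_, h1⟩
  rw [h.rsp]
  unfold addr
  u_omega

/-! ### A block of the ghost arena: where it is, a check site inside it -/

/-- **Where a block of the arena is**, as one arithmetic fact for the walker: above the text, in the data space, off the stack,
inside the arena's buffer. -/
theorem arena_where {u₀ : State} {g : Ghost} {pc : Word} {i zf : Nat} {A6 A6c Ai : Arena} {A : Arena × List Obj} {v : State}
    (h : ResLoop u₀ g pc i zf A6 A6c Ai A v) {B : Block} (hB : A.1.Blk B) :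
    0x119d40 ≤ B.base ∧ B.base + B.size ≤ 0xC00000 ∧ (B.base + B.size ≤ 0x700000 ∨ 0x800000 ≤ B.base) ∧
      A.1.B ≤ B.base ∧ B.base + B.size ≤ A.1.B + A.1.L := by
  have harena := h.mid.arena
  have hoff := harena.blk_off_stack hB
  have hin := arena_inside harena hB
  have hb := harena.bounds
  have ht := h.hand.arenaText
  have e : L.textHi = 0x119d40 := rfl
  omega

/-- **A check site inside a block of the arena**: the block is ONE live object (AR6). -/
theorem check_blk {u₀ : State} {g : Ghost} {pc : Word} {i zf : Nat} {A6 A6c Ai : Arena} {A : Arena × List Obj} {v : State}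
    (h : ResLoop u₀ g pc i zf A6 A6c Ai A v) {B : Block} (hB : A.1.Blk B) {mem' : Mem}
    (hun : ShadowUntouched v.mem mem') (b : Word) (off k : Nat) (hb : b.toNat = B.base + off) (hk : 1 ≤ k)
    (hoff : off + k ≤ B.size) : AccSmall k mem' b := by
  have hl : LiveIn A.2 g.frames' _ _ := liveIn_of_arenaBlk h.mid.arena hB
  apply hl.accSmall h.frame.shadow hun b k hk
  · omega
  · omega

/-! ### The three blocks of the round -/

/-- **What the round of loop 4084 knows about places and numbers**, for the record at `r`, the `classdata` table at `cd` (`8·E`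
bytes), row `j` at `row` (`W` bytes), `cls = classifications`, `temp` = the dword `[R + 18H]`: the three blocks are blocks of
the arena, the bounds of the counters. -/
structure Geo (g : Ghost) (A : Arena × List Obj) (rc cfg r cd E row W cls temp j n : Nat) : Prop where
  /-- the `residue_config` block -/
  cfgB : A.1.Blk ⟨cfg, 32 * rc⟩
  /-- record `i` lies inside it -/
  r_lo : cfg ≤ r
  r_hi : r + 32 ≤ cfg + 32 * rc
  /-- the `classdata` table -/
  cdB : A.1.Blk ⟨cd, 8 * E⟩
  /-- row `j` -/
  rowB : A.1.Blk ⟨row, W⟩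
  j_lt : j < E
  e_lt : E < 2 ^ 31
  n_le : n ≤ W
  w_lt : W < 2 ^ 31
  cls_pos : 1 ≤ cls
  cls_le : cls ≤ 64
  temp_le : temp ≤ j
  /-- the `residue_config` block is older than row `j`: they are apart -/
  cfg_row : row + W ≤ cfg ∨ cfg + 32 * rc ≤ row

/-- The places and numbers of the round from the head's assertion. -/
theorem geo {u₀ : State} {g : Ghost} {i j E n : Nat} {A6 A6c Ai Ak Ad Ar : Arena} {A : Arena × List Obj} {v : State}
    (hb : BodyR7K u₀ g i j E n A6 A6c Ai Ak Ad Ar A v) :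
    Geo g A (stb_vorbis.residue_count v.mem g.f).toNat (stb_vorbis.residue_config v.mem g.f) (resAt g v.mem i)
      (Residue.classdata v.mem (resAt g v.mem i)) E (Residue.row v.mem (resAt g v.mem i) j)
      (Residue.W v.mem g.f (resAt g v.mem i)) (Residue.classifications v.mem (resAt g v.mem i)) (StartDecoder.slot g v.mem 0x18) j n := by
  have hres := hb.loop.res
  have h1 := hres.R1
  have hlt := hb.cur.lt
  have hcfg := (hres.R2.1.mono hres.ext6c).mono hres.exti
  simp only [Off.sizeof.Residue] at hcfg
  have hcd := ((hb.cur.R8a (by omega)).1.mono (hb.extr.trans hb.extr'))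
  rw [hb.e_eq] at hcd
  have hE := hb.e_eq
  have h2 := Mem.i32_range v.mem (Residue.cbk v.mem g.f (resAt g v.mem i) + Off.Codebook.entries)
  have h3 := Mem.i32_range v.mem (Residue.cbk v.mem g.f (resAt g v.mem i) + Off.Codebook.dimensions)
  simp only [Residue.E, Codebook.entries] at hE
  have hcfgAr : Ar.Blk ⟨stb_vorbis.residue_config v.mem g.f, Off.sizeof.Residue * (stb_vorbis.residue_count v.mem g.f).toNat⟩ :=
    (hres.R2.1.mono hres.ext6c).mono ((hb.extk.trans hb.extd).trans hb.extr)
  have hdis := arena_disjoint hb.loop.mid.arena (hcfgAr.mono hb.extr') hb.row.1 (Since.ne_old hcfgAr hb.row)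
  simp only [vblock, Off.sizeof.Residue] at hdis
  exact
    { cfgB := hcfg
      r_lo := by
        simp only [resAt, vacc, voff]
        omega
      r_hi := by
        simp only [resAt, vacc, voff] at h1 hlt ⊢
        omega
      cdB := hcd
      rowB := hb.row.1
      j_lt := hb.j_lt
      e_lt := by omega
      n_le := hb.n_le
      w_lt := by
        simp only [Residue.W, Codebook.dimensions]
        omega
      cls_pos := hb.cur.R6.1
      cls_le := hb.cur.R6.2
      temp_le := hb.temp
      cfg_row := by omega }

/-! ### The loads of the round, in the walker's form -/

/-- `movzx r32, byte [rbx + 0CH]`: `r->classifications`. -/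
theorem load_cls (m : Mem) (r : Nat) : m.readLE (UInt64.ofNat r + 12) 1 = Residue.classifications m r := by
  show m.readLE (addr r + 12) 1 = _
  simp only [vfield, vacc, voff]

/-- `add r15, [rbx + 10H]`: `r->classdata`. -/
theorem load_cd (m : Mem) (r : Nat) : m.readLE (UInt64.ofNat r + 16) 8 = Residue.classdata m r := by
  show m.readLE (addr r + 16) 8 = _
  simp only [vfield, vacc, voff]

/-- `add rsi, [r15]` with `r15 = 8j + classdata`: the row pointer `classdata[j]`. -/
theorem load_row (m : Mem) (r cd j : Nat) (h : Residue.classdata m r = cd) :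
    m.readLE (UInt64.ofNat (8 * j) + UInt64.ofNat cd) 8 = Residue.row m r j := by
  unfold Residue.row
  rw [h]
  unfold Mem.ptr Mem.u64 addr
  congr 1
  rw [← UInt64.ofNat_add]
  congr 1
  omega

/-- The spill slot `[R + 18H]` (`temp`) as the walker spells it. -/
theorem slot18_addr (g : Ghost) (hR : g.R + 1480 = (g.e.reg .rsp).toNat) (h1 : 0x700000 + 1888 ≤ (g.e.reg .rsp).toNat)
    (h2 : (g.e.reg .rsp).toNat + 8 ≤ 0x800000) : g.e.reg .rsp - 1456 = addr (g.R + 0x18) := by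
  have k1 := h1
  have k2 := h2
  unfold addr
  u_omega

/-- `mov eax, [rsp + 18H]`: `temp`. -/
theorem load_temp (g : Ghost) (m : Mem) (hR : g.R + 1480 = (g.e.reg .rsp).toNat) (h1 : 0x700000 + 1888 ≤ (g.e.reg .rsp).toNat)
    (h2 : (g.e.reg .rsp).toNat + 8 ≤ 0x800000) : m.readLE (g.e.reg .rsp - 1456) 4 = StartDecoder.slot g m 0x18 := by
  rw [slot18_addr g hR h1 h2]
  rfl

/-- The address of the byte `classdata[j][k]` as the walker spells it (`movsxd rax, r12d ; add rsi, [r15]`). -/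
theorem byte_addr (k row : Nat) : UInt64.ofNat k + UInt64.ofNat row = addr (row + k) := by
  unfold addr
  rw [← UInt64.ofNat_add]
  congr 1
  omega

/-- `mov [r15], dl` with `edx = movzx byte [rsp + 30H]` = the digit `temp % classifications < 256`: the byte stored is the digit. -/
theorem byte_of_digit (d : Nat) (hd : d < 256) :
    (BitVec.setWidth 8 (BitVec.zeroExtend 32 (BitVec.ofNat 8 (d % 256)))).toNat = d := by
  show (BitVec.setWidth 8 (BitVec.setWidth 32 (BitVec.ofNat 8 (d % 256)))).toNat = d
  rw [BitVec.toNat_setWidth, BitVec.toNat_setWidth, BitVec.toNat_ofNat]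
  omega

/-! ### r12d as the counter `k = n − 1` -/

/-- With bytes left (`n ≥ 1`) r12 holds `n − 1`. -/
theorem kword_pos (n : Nat) (hn : 0 < n) : R7.kword n = UInt64.ofNat (n - 1) := by
  unfold R7.kword addr
  rw [if_neg (by omega)]

/-- `test r12d, r12d ; js` with `k = n − 1 ≥ 0` (below 2^31): not taken. -/
theorem k_msb (k : Nat) (hk : k < 2 ^ 31) : (Word.part .w32 (UInt64.ofNat k)).msb = false := by
  rw [cnt32_part, BitVec.msb_eq_decide, toNat_ofNat32 k (by omega)]
  simp only [decide_eq_false_iff_not, Nat.not_le]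
  omega

/-- `sub r12d, 1` (0x115ee4): `k = n − 1` becomes `n − 2`, or `−1 = FFFFFFFFH` when the last byte was stored. -/
theorem kword_pred (n : Nat) (hn : 0 < n) (hlt : n < 2 ^ 31) :
    Word.ofBV (Word.part .w32 (UInt64.ofNat (n - 1)) - 1#32) = R7.kword (n - 1) := by
  unfold R7.kword addr
  apply UInt64.toNat_inj.mp
  rw [Vorbis.toNat_ofBV32, cnt32_part, BitVec.toNat_sub, toNat_ofNat32 (n - 1) (by omega)]
  by_cases h1 : n - 1 = 0
  · rw [if_pos h1, h1]
    rfl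
  · rw [if_neg h1, UInt64.toNat_ofNat']
    show (2 ^ 32 - 1 + (n - 1)) % 2 ^ 32 = (n - 1 - 1) % 2 ^ 64
    omega

/-- `movzx r32, byte [m]` of a byte value: the number itself as a dword. -/
theorem zext8 (c : Nat) (hc : c < 256) : BitVec.zeroExtend 32 (BitVec.ofNat 8 c) = BitVec.ofNat 32 c := by
  apply BitVec.eq_of_toNat_eq
  show (BitVec.setWidth 32 (BitVec.ofNat 8 c)).toNat = _
  rw [BitVec.toNat_setWidth, BitVec.toNat_ofNat, BitVec.toNat_ofNat]
  omega

/-! ### `cdq ; idiv r32` with `0 ≤ temp < 2^31`, `1 ≤ classifications ≤ 64` -/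

/-- **`cdq ; idiv` of a non-negative dividend by a positive divisor does not fault** and gives the unsigned quotient and
remainder (bit-vector form): both operands have a clear sign bit, so the signed 64-bit division of the model is the unsigned one. -/
theorem idiv_small (z d : BitVec 32) (hz : z.toNat < 2 ^ 31) (hd1 : 1 ≤ d.toNat) (hd : d.toNat < 2 ^ 31) :
    Alu.div true (if z.msb = true then BitVec.allOnes 32 else 0) z d = some (z / d, z % d) := by
  have hm : z.msb = false := BitVec.msb_eq_false_iff_two_mul_lt.mpr (by omega)
  have hdm : d.msb = false := BitVec.msb_eq_false_iff_two_mul_lt.mpr (by omega)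
  have h0 : (d == 0) = false := by
    apply beq_false_of_ne
    intro h
    rw [h] at hd1
    exact absurd hd1 (by decide)
  have e1 : ((0 : BitVec 32) ++ z) = z.setWidth 64 := by bv_decide
  have e2 : d.signExtend (32 + 32) = d.setWidth 64 := BitVec.signExtend_eq_setWidth_of_msb_false hdm
  have n1 : (z.setWidth 64).toNat = z.toNat := by
    rw [BitVec.toNat_setWidth]
    omega
  have n2 : (d.setWidth 64).toNat = d.toNat := by
    rw [BitVec.toNat_setWidth]
    omega
  have m1 : (z.setWidth 64).msb = false := BitVec.msb_eq_false_iff_two_mul_lt.mpr (by omega)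
  have m2 : (d.setWidth 64).msb = false := BitVec.msb_eq_false_iff_two_mul_lt.mpr (by omega)
  have hq : (z.setWidth 64).sdiv (d.setWidth 64) = (z / d).setWidth 64 := by
    rw [BitVec.sdiv_eq, m1, m2]
    apply BitVec.eq_of_toNat_eq
    have l : ((z.setWidth 64) / (d.setWidth 64)).toNat = z.toNat / d.toNat := by
      rw [BitVec.toNat_udiv, n1, n2]
    have r : ((z / d).setWidth 64).toNat = z.toNat / d.toNat := by
      rw [BitVec.toNat_setWidth, BitVec.toNat_udiv]
      have := Nat.div_le_self z.toNat d.toNat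
      omega
    exact l.trans r.symm
  have hr : (z.setWidth 64).srem (d.setWidth 64) = (z % d).setWidth 64 := by
    rw [BitVec.srem_eq, m1, m2]
    apply BitVec.eq_of_toNat_eq
    have l : ((z.setWidth 64) % (d.setWidth 64)).toNat = z.toNat % d.toNat := by
      rw [BitVec.toNat_umod, n1, n2]
    have r : ((z % d).setWidth 64).toNat = z.toNat % d.toNat := by
      rw [BitVec.toNat_setWidth, BitVec.toNat_umod]
      have := Nat.mod_le z.toNat d.toNat
      omega
    exact l.trans r.symm
  have hqm : (z / d).msb = false := by
    apply BitVec.msb_eq_false_iff_two_mul_lt.mpr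
    rw [BitVec.toNat_udiv]
    have := Nat.div_le_self z.toNat d.toNat
    omega
  have s1 : ((z / d).setWidth 64).setWidth 32 = z / d := by
    apply BitVec.eq_of_toNat_eq
    rw [BitVec.toNat_setWidth, BitVec.toNat_setWidth]
    have := (z / d).isLt
    omega
  have s2 : ((z % d).setWidth 64).setWidth 32 = z % d := by
    apply BitVec.eq_of_toNat_eq
    rw [BitVec.toNat_setWidth, BitVec.toNat_setWidth]
    have := (z % d).isLt
    omega
  have h1 : (BitVec.signExtend (32 + 32) (z / d) != BitVec.setWidth 64 (z / d)) = false := by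
    rw [BitVec.signExtend_eq_setWidth_of_msb_false hqm]
    exact bne_self_eq_false _
  unfold Alu.div
  simp only [hm, h0, Bool.false_eq_true, if_false, e1, e2, hq, hr, s1, s2, h1]
  exact if_pos trivial

/-- The same over numbers: the dividend `z < 2^31` and the divisor `1 ≤ d < 2^31` as 32-bit vectors. -/
theorem idiv_nat (z d : Nat) (hz : z < 2 ^ 31) (hd1 : 1 ≤ d) (hd : d < 2 ^ 31) :
    Alu.div true (if (BitVec.ofNat 32 z).msb = true then BitVec.allOnes 32 else 0) (BitVec.ofNat 32 z) (BitVec.ofNat 32 d) =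
      some (BitVec.ofNat 32 (z / d), BitVec.ofNat 32 (z % d)) := by
  have ez : (BitVec.ofNat 32 z).toNat = z := toNat_ofNat32 z (by omega)
  have ed : (BitVec.ofNat 32 d).toNat = d := toNat_ofNat32 d (by omega)
  have hq : z / d ≤ z := Nat.div_le_self _ _
  have hr : z % d < d := Nat.mod_lt _ (by omega)
  rw [idiv_small _ _ (by omega) (by omega) (by omega)]
  congr 1
  congr 1
  · apply BitVec.eq_of_toNat_eq
    rw [BitVec.toNat_udiv, ez, ed, toNat_ofNat32 _ (by omega)]
  · apply BitVec.eq_of_toNat_eq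
    rw [BitVec.toNat_umod, ez, ed, toNat_ofNat32 _ (by omega)]

end Vorbis.Spec.start_decoder_R7c
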